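-- pv_equiv track=rewrite | github.com/RFjell/Advent-of-Code | day07/07_2.py | is_aba_and_bab_exists
-- ===== SOURCE A (Python) =====
-- def is_aba_and_bab_exists(word, hypernet):
--     for i in range(len(word)-2):
--         # is aba?
--         if word[i] == word[i+2] and word[i+1] != word[i] and word[i] != word[i+1]:
--             bab = word[i+1] + word[i] + word[i+1]
--             # check for bab
--             for x in hypernet:
--                 if bab in x:
--                     return True
--     return False
-- ===== SOURCE B (Python) =====
-- def is_aba_and_bab_exists(word, hypernet):
--     babs = {word[i + 1] + word[i] + word[i + 1]
--             for i in range(len(word) - 2)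
--             if word[i] == word[i + 2] and word[i] != word[i + 1]}
--     windows = {x[j:j + 3] for x in hypernet for j in range(len(x) - 2)}
--     return bool(babs & windows)
-- ===== Notes on version B (the rewrite author's own statement) =====
-- stated objective: idiomatic
-- what changed: A's indexed word loop with early return and a nested per-candidate scan of every hypernet string is replaced by two independent set-building passes (the set of BABs required by the word's ABAs and the set of all 3-char windows of the hypernet strings) decided by a single set intersection.
import Mathlib
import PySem

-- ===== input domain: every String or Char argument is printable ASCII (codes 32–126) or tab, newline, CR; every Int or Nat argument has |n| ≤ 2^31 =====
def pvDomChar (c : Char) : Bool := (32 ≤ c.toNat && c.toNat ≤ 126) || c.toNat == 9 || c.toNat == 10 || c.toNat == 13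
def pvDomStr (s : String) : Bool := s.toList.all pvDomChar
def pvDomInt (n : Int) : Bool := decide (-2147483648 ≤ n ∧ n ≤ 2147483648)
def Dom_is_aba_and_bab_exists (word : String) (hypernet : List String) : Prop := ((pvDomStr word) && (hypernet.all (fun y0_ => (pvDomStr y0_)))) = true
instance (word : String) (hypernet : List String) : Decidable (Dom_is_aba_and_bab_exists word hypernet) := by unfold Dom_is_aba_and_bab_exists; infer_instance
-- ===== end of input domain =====

-- B replaces A's nested scan-with-early-exit by two independent set-building passes
-- (the ABAs' required BABs, and all 3-char windows of the hypernets) decided by set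
-- intersection; objective: idiomatic, same asymptotic cost.

-- ===== PORT A =====
-- A: index loop over word with early return; inner loop over hypernet testing 'bab in x'.
def is_aba_and_bab_exists (word : String) (hypernet : List String) : Bool :=
  let w := word.toList
  (List.range (w.length - 2)).any fun i =>
    match w[i]?, w[i+1]?, w[i+2]? with
    | some a, some b, some c =>
      if a == c && b != a && a != b then
        -- bab = word[i+1] + word[i] + word[i+1]; 'bab in x' is PySem.Str.isIn
        hypernet.any fun x => PySem.Str.isIn (String.ofList [b, a, b]) x
      else false
    | _, _, _ => false

-- ===== PORT B =====
-- the guarded element of B's first set comprehension at index i (none = filtered out)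
def pvBab? (w : List Char) (i : Nat) : Option String :=
  w[i]?.bind fun a =>
    w[i+1]?.bind fun b =>
      w[i+2]?.bind fun c =>
        if a == c && a != b then some (String.ofList [b, a, b]) else none

-- x[j:j+3], ported on the list side (exact: PySem.List.slice is Python's slice)
def pvWin (x : String) (j : Nat) : String :=
  String.ofList (PySem.List.slice x.toList (some (j : Int)) (some ((j : Int) + 3)))

-- 'add f i if the guard let it through' — one comprehension step
def pvStep (f : Nat → Option String) (s : PySem.Set String) (i : Nat) : PySem.Set String :=
  match f i with
  | some v => PySem.Set.add s v
  | none => s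

-- babs = {word[i+1]+word[i]+word[i+1] for i in range(len(word)-2) if ...}
def pvBabSet (w : List Char) : PySem.Set String :=
  (List.range (w.length - 2)).foldl (pvStep (pvBab? w)) PySem.Set.empty

-- windows = {x[j:j+3] for x in hypernet for j in range(len(x)-2)}
def pvWinSet (hyper : List String) : PySem.Set String :=
  hyper.foldl
    (fun s x =>
      (List.range (x.toList.length - 2)).foldl
        (fun s j => PySem.Set.add s (pvWin x j)) s)
    PySem.Set.empty

def is_aba_and_bab_exists_alt (word : String) (hypernet : List String) : Bool :=
  decide (PySem.Set.inter (pvBabSet word.toList) (pvWinSet hypernet) ≠ [])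

-- ===== PRECONDITION & SPEC =====
def Spec_is_aba_and_bab_exists (word : String) (hypernet : List String) (out : Bool) : Prop := out = is_aba_and_bab_exists_alt word hypernet
instance (word : String) (hypernet : List String) (out : Bool) : Decidable (Spec_is_aba_and_bab_exists word hypernet out) := by unfold Spec_is_aba_and_bab_exists; infer_instance

-- ===== CLAIM (what is proved, stated in full; the proofs are below) =====
def Claim_equal_is_aba_and_bab_exists : Prop := ∀ (word : String) (hypernet : List String), Dom_is_aba_and_bab_exists word hypernet → Spec_is_aba_and_bab_exists word hypernet (is_aba_and_bab_exists word hypernet)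

-- ===== LEMMAS AND PROOFS =====

-- membership in a fold that conditionally adds f i for i in l
theorem pv_mem_foldl_opt (f : Nat → Option String)
    (l : List Nat) (s0 : PySem.Set String) (y : String) :
    (y ∈ l.foldl (pvStep f) s0)
      ↔ y ∈ s0 ∨ ∃ i ∈ l, f i = some y := by
  induction l generalizing s0 with
  | nil => simp
  | cons i l ih =>
    simp only [List.foldl_cons, ih, List.mem_cons]
    cases hf : f i with
    | none =>
      simp only [pvStep, hf]
      constructor
      · rintro (h | ⟨j, hj, hy⟩)
        · exact Or.inl h
        · exact Or.inr ⟨j, Or.inr hj, hy⟩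
      · rintro (h | ⟨j, (rfl | hj), hy⟩)
        · exact Or.inl h
        · rw [hf] at hy; cases hy
        · exact Or.inr ⟨j, hj, hy⟩
    | some v =>
      simp only [pvStep, hf]
      rw [PySem.Set.mem_add]
      constructor
      · rintro ((h | rfl) | ⟨j, hj, hy⟩)
        · exact Or.inl h
        · exact Or.inr ⟨i, Or.inl rfl, hf⟩
        · exact Or.inr ⟨j, Or.inr hj, hy⟩
      · rintro (h | ⟨j, (rfl | hj), hy⟩)
        · exact Or.inl (Or.inl h)
        · rw [hf] at hy; cases hy; exact Or.inl (Or.inr rfl)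
        · exact Or.inr ⟨j, hj, hy⟩

-- membership in a fold that adds f i for every i in l
theorem pv_mem_foldl_add {α : Type} [BEq α] [LawfulBEq α] (f : Nat → α)
    (l : List Nat) (s0 : PySem.Set α) (y : α) :
    (y ∈ l.foldl (fun s i => PySem.Set.add s (f i)) s0)
      ↔ y ∈ s0 ∨ ∃ i ∈ l, f i = y := by
  induction l generalizing s0 with
  | nil => simp
  | cons i l ih =>
    simp only [List.foldl_cons, ih, List.mem_cons, PySem.Set.mem_add]
    constructor
    · rintro ((h | rfl) | ⟨j, hj, hy⟩)
      · exact Or.inl h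
      · exact Or.inr ⟨i, Or.inl rfl, rfl⟩
      · exact Or.inr ⟨j, Or.inr hj, hy⟩
    · rintro (h | ⟨j, (rfl | hj), hy⟩)
      · exact Or.inl (Or.inl h)
      · exact Or.inl (Or.inr hy.symm)
      · exact Or.inr ⟨j, hj, hy⟩

theorem pv_mem_babSet (w : List Char) (y : String) :
    y ∈ pvBabSet w ↔ ∃ i < w.length - 2, pvBab? w i = some y := by
  unfold pvBabSet
  rw [pv_mem_foldl_opt (pvBab? w) (List.range (w.length - 2)) PySem.Set.empty y]
  simp [PySem.Set.empty, List.mem_range]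

-- membership in B's window set
theorem pv_mem_winSet (hyper : List String) (y : String) :
    y ∈ pvWinSet hyper ↔ ∃ x ∈ hyper, ∃ j < x.toList.length - 2, pvWin x j = y := by
  unfold pvWinSet
  have key : ∀ (hs : List String) (s0 : PySem.Set String),
      (y ∈ hs.foldl (fun s x => (List.range (x.toList.length - 2)).foldl
          (fun s j => PySem.Set.add s (pvWin x j)) s) s0)
        ↔ y ∈ s0 ∨ ∃ x ∈ hs, ∃ j < x.toList.length - 2, pvWin x j = y := by
    intro hs
    induction hs with
    | nil => intro s0; simp
    | cons x hs ih =>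
      intro s0
      simp only [List.foldl_cons, ih, List.mem_cons]
      have hx := pv_mem_foldl_add (fun j => pvWin x j)
        (List.range (x.toList.length - 2)) s0 y
      simp only [List.mem_range] at hx
      rw [hx]
      constructor
      · rintro ((h | ⟨j, hj, hy⟩) | ⟨z, hz, j, hj, hy⟩)
        · exact Or.inl h
        · exact Or.inr ⟨x, Or.inl rfl, j, hj, hy⟩
        · exact Or.inr ⟨z, Or.inr hz, j, hj, hy⟩
      · rintro (h | ⟨z, (rfl | hz), j, hj, hy⟩)
        · exact Or.inl (Or.inl h)
        · exact Or.inl (Or.inr ⟨j, hj, hy⟩)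
        · exact Or.inr ⟨z, hz, j, hj, hy⟩
  rw [key hyper PySem.Set.empty]
  simp [PySem.Set.empty]

-- a 3-char list is an infix of x.toList iff it is one of B's windows of x
theorem pv_infix_iff_window (sub : List Char) (h3 : sub.length = 3) (x : String) :
    sub <:+: x.toList ↔ ∃ j < x.toList.length - 2, pvWin x j = String.ofList sub := by
  have hwin : ∀ j : Nat, pvWin x j = String.ofList ((x.toList.drop j).take 3) := by
    intro j
    have : PySem.List.slice x.toList (some (j : Int)) (some ((j : Int) + 3))
        = (x.toList.drop j).take 3 := by
      have := PySem.List.slice_natCast_add x.toList j 3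
      simpa using this
    simp [pvWin, this]
  constructor
  · intro h
    have hIn : PySem.Chars.isIn sub x.toList = true :=
      (PySem.Chars.isIn_iff_infix sub x.toList).mpr h
    obtain ⟨j, hpre⟩ := (PySem.Chars.exists_prefix_drop_iff_isIn sub x.toList).mpr hIn
    have heq : sub = (List.drop j x.toList).take sub.length :=
      (List.prefix_iff_eq_take).mp hpre
    rw [h3] at heq
    have hlen : sub.length ≤ (List.drop j x.toList).length := hpre.length_le
    rw [h3, List.length_drop] at hlen
    refine ⟨j, by omega, ?_⟩
    rw [hwin j, ← heq]
  · rintro ⟨j, hj, hy⟩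
    rw [hwin j] at hy
    have := congrArg String.toList hy
    simp only [String.toList_ofList] at this
    rw [← this]
    exact ((x.toList.drop j).take_prefix 3).isInfix.trans (x.toList.drop_suffix j).isInfix

-- A's loop body at index i, as an existential over B's data
theorem pv_bodyA_iff (w : List Char) (hyper : List String) (i : Nat) :
    ((match w[i]?, w[i+1]?, w[i+2]? with
      | some a, some b, some c =>
        if a == c && b != a && a != b then
          hyper.any fun x => PySem.Str.isIn (String.ofList [b, a, b]) x
        else false
      | _, _, _ => false) = true)
      ↔ ∃ v, pvBab? w i = some v ∧ ∃ x ∈ hyper, ∃ j < x.toList.length - 2, pvWin x j = v := by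
  simp only [pvBab?]
  cases h0 : w[i]? with
  | none => simp
  | some a =>
    cases h1 : w[i+1]? with
    | none => simp
    | some b =>
      cases h2 : w[i+2]? with
      | none => simp
      | some c =>
        by_cases hac : a = c
        · subst hac
          by_cases hab : a = b
          · subst hab
            simp
          · have hba : b ≠ a := fun h => hab h.symm
            have hcA : (a == a && b != a && a != b) = true := by simp [hab, hba]
            have hcB : (a == a && a != b) = true := by simp [hab]
            simp only [hcA, hcB, Option.bind_some, if_true, List.any_eq_true, Option.some.injEq]
            constructor
            · rintro ⟨x, hx, hIn⟩
              refine ⟨String.ofList [b, a, b], rfl, x, hx, ?_⟩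
              have hinf := (PySem.Str.isIn_iff_infix (String.ofList [b, a, b]) x).mp hIn
              simp only [String.toList_ofList] at hinf
              exact (pv_infix_iff_window [b, a, b] (by simp) x).mp hinf
            · rintro ⟨v, hv, x, hx, j, hj, hy⟩
              subst hv
              refine ⟨x, hx, ?_⟩
              apply (PySem.Str.isIn_iff_infix (String.ofList [b, a, b]) x).mpr
              simp only [String.toList_ofList]
              exact (pv_infix_iff_window [b, a, b] (by simp) x).mpr ⟨j, hj, hy⟩
        · simp [hac]

-- ===== VERDICT (by name: the statement is the Claim_ definition above) =====
theorem is_aba_and_bab_exists_spec : Claim_equal_is_aba_and_bab_exists := by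
  intro word hypernet _
  unfold Spec_is_aba_and_bab_exists
  unfold is_aba_and_bab_exists is_aba_and_bab_exists_alt
  rw [Bool.eq_iff_iff]
  simp only [List.any_eq_true, List.mem_range, decide_eq_true_eq]
  constructor
  · rintro ⟨i, hi, hbody⟩
    obtain ⟨v, hv, x, hx, j, hj, hy⟩ := (pv_bodyA_iff word.toList hypernet i).mp hbody
    intro hnil
    have hvmem : v ∈ PySem.Set.inter (pvBabSet word.toList) (pvWinSet hypernet) := by
      rw [PySem.Set.mem_inter]
      exact ⟨(pv_mem_babSet word.toList v).mpr ⟨i, hi, hv⟩,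
        (pv_mem_winSet hypernet v).mpr ⟨x, hx, j, hj, hy⟩⟩
    rw [hnil] at hvmem
    cases hvmem
  · intro hne
    obtain ⟨v, hvmem⟩ := List.exists_mem_of_ne_nil _ hne
    rw [PySem.Set.mem_inter, pv_mem_babSet, pv_mem_winSet] at hvmem
    obtain ⟨⟨i, hi, hv⟩, x, hx, j, hj, hy⟩ := hvmem
    exact ⟨i, hi, (pv_bodyA_iff word.toList hypernet i).mpr ⟨v, hv, x, hx, j, hj, hy⟩⟩
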